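-- pv_equiv track=rewrite | github.com/qtong0/LeetcodePythonProject | solutions/leetcode_0801_0850/LeetCode809_ExpressiveWords.py | isStretchy
-- ===== SOURCE A (Python) =====
-- def isStretchy(s0, s1):
--     m, n = len(s0), len(s1)
--     i, j = 0, 0
--     while i < m and j < n:
--         if s0[i] != s1[j]:
--             return False
--         s0BlockSize = 1
--         i += 1
--         while i < m and s0[i-1] == s0[i]:
--             s0BlockSize += 1
--             i += 1
--         s1BlockSize = 1
--         j += 1
--         while j < n and s1[j-1] == s1[j]:
--             s1BlockSize += 1
--             j += 1
--         if s0BlockSize < s1BlockSize or (s1BlockSize < s0BlockSize < 3):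
--             return False
--     return i == len(s0) and j == len(s1)
-- ===== SOURCE B (Python) =====
-- def isStretchy(s0, s1):
--     def rle(s):
--         runs = []
--         for ch in s:
--             if runs and runs[-1][0] == ch:
--                 runs[-1] = (ch, runs[-1][1] + 1)
--             else:
--                 runs.append((ch, 1))
--         return runs
--     r0, r1 = rle(s0), rle(s1)
--     if len(r0) != len(r1):
--         return False
--     return all(c0 == c1 and n0 >= n1 and (n0 == n1 or n0 >= 3)
--                for (c0, n0), (c1, n1) in zip(r0, r1))
-- ===== Notes on version B (the rewrite author's own statement) =====
-- stated objective: simpler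
-- what changed: Replaces the interleaved two-pointer walk with two separate phases: a fold that run-length-encodes each string, then a single aligned comparison of the two run lists.
import Mathlib
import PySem

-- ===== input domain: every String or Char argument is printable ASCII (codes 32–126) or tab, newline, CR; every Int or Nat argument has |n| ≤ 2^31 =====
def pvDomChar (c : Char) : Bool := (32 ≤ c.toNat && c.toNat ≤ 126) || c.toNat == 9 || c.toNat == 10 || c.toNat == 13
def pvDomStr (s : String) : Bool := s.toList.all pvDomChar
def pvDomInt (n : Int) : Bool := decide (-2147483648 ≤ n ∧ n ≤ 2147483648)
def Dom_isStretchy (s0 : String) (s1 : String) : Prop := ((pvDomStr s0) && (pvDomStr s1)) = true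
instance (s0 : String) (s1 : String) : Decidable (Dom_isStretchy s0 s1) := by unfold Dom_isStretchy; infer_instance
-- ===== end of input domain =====

-- B separates A's interleaved two-pointer walk into run-length encoding (a fold) plus one aligned comparison; objective: simpler decomposition, same cost.


-- ===== PORT A =====
-- inner while loop of A: consume the leading run equal to c, returning (block size, rest)
def runA (c : Char) : List Char → Nat × List Char
  | [] => (1, [])
  | x :: xs => if x = c then
      let p := runA x xs
      (p.1 + 1, p.2)
    else (1, x :: xs)

theorem runA_snd_length (c : Char) (l : List Char) : (runA c l).2.length ≤ l.length := by
  induction l generalizing c with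
  | nil => simp [runA]
  | cons x xs ih =>
    simp only [runA]
    split
    · exact Nat.le_succ_of_le (ih x)
    · simp

-- outer while loop of A
def loopA : List Char → List Char → Bool
  | x :: xs, y :: ys =>
    if x ≠ y then false
    else
      let p0 := runA x xs
      let p1 := runA y ys
      if p0.1 < p1.1 ∨ (p1.1 < p0.1 ∧ p0.1 < 3) then false
      else loopA p0.2 p1.2
  | l0, l1 => l0.isEmpty && l1.isEmpty
  termination_by l0 _ => l0.length
  decreasing_by
    exact Nat.lt_succ_of_le (runA_snd_length x xs)

def isStretchy (s0 : String) (s1 : String) : Bool :=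
  loopA s0.toList s1.toList

-- ===== PORT B =====
-- one step of Source B's rle fold: extend the last run or start a new one
def rleStep (runs : List (Char × Nat)) (ch : Char) : List (Char × Nat) :=
  match runs.getLast? with
  | some (c, n) => if c = ch then runs.dropLast ++ [(ch, n + 1)] else runs ++ [(ch, 1)]
  | none => [(ch, 1)]

def rleB (s : List Char) : List (Char × Nat) := s.foldl rleStep []

def okPair (p q : Char × Nat) : Bool :=
  p.1 == q.1 && q.2 ≤ p.2 && (p.2 == q.2 || 3 ≤ p.2)

def isStretchy_alt (s0 : String) (s1 : String) : Bool :=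
  let r0 := rleB s0.toList
  let r1 := rleB s1.toList
  if r0.length ≠ r1.length then false
  else (r0.zip r1).all (fun pq => okPair pq.1 pq.2)

-- ===== PRECONDITION & SPEC =====
def Spec_isStretchy (s0 : String) (s1 : String) (out : Bool) : Prop := out = isStretchy_alt s0 s1
instance (s0 : String) (s1 : String) (out : Bool) : Decidable (Spec_isStretchy s0 s1 out) := by unfold Spec_isStretchy; infer_instance

-- ===== CLAIM (what is proved, stated in full; the proofs are below) =====
def Claim_equal_isStretchy : Prop := ∀ (s0 : String) (s1 : String), Dom_isStretchy s0 s1 → Spec_isStretchy s0 s1 (isStretchy s0 s1)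

-- ===== LEMMAS AND PROOFS =====

theorem rleStep_ne_nil (runs : List (Char × Nat)) (ch : Char) : rleStep runs ch ≠ [] := by
  unfold rleStep
  cases h : runs.getLast? with
  | none => simp
  | some p => cases p with | mk c n => by_cases hc : c = ch <;> simp [hc]

-- rleStep only looks at the last element of the accumulator
theorem rleStep_append (a b : List (Char × Nat)) (ch : Char) (hb : b ≠ []) :
    rleStep (a ++ b) ch = a ++ rleStep b ch := by
  unfold rleStep
  rw [List.getLast?_append_of_ne_nil a hb]
  cases h : b.getLast? with
  | none => rw [List.getLast?_eq_none_iff] at h; exact absurd h hb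
  | some p =>
    cases p with
    | mk c n =>
      by_cases hc : c = ch
      · simp [hc, List.dropLast_append_of_ne_nil hb]
      · simp [hc]

theorem foldl_rleStep_append (l : List Char) (a b : List (Char × Nat)) (hb : b ≠ []) :
    l.foldl rleStep (a ++ b) = a ++ l.foldl rleStep b := by
  induction l generalizing b with
  | nil => simp
  | cons x xs ih =>
    simp only [List.foldl_cons]
    rw [rleStep_append a b x hb]
    exact ih (rleStep b x) (rleStep_ne_nil b x)

theorem fold_head (l : List Char) (c : Char) (n : Nat) :
    l.foldl rleStep [(c, n)] = (c, n + (runA c l).1 - 1) :: rleB (runA c l).2 := by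
  induction l generalizing c n with
  | nil => simp [runA, rleB]
  | cons x xs ih =>
    by_cases hx : x = c
    · subst hx
      have hr : runA x (x :: xs) = ((runA x xs).1 + 1, (runA x xs).2) := by
        simp [runA]
      have step : rleStep [(x, n)] x = [(x, n + 1)] := by simp [rleStep]
      rw [List.foldl_cons, step, ih x (n + 1), hr]
      simp only []
      congr 2
      omega
    · have step : rleStep [(c, n)] x = [(c, n)] ++ [(x, 1)] := by
        simp [rleStep, Ne.symm hx]
      have hr : runA c (x :: xs) = (1, x :: xs) := by simp [runA, hx]
      rw [List.foldl_cons, step, foldl_rleStep_append xs [(c, n)] [(x, 1)] (by simp), hr]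
      have : rleB (x :: xs) = xs.foldl rleStep [(x, 1)] := by
        unfold rleB
        rw [List.foldl_cons, show rleStep [] x = [(x, 1)] from by simp [rleStep]]
      simp [this]

theorem rleB_cons (x : Char) (xs : List Char) :
    rleB (x :: xs) = (x, (runA x xs).1) :: rleB (runA x xs).2 := by
  unfold rleB
  rw [List.foldl_cons, show rleStep [] x = [(x, 1)] from by simp [rleStep], fold_head xs x 1]
  congr 2
  have h1 : 1 ≤ (runA x xs).1 := by
    cases xs with
    | nil => simp [runA]
    | cons y ys => simp only [runA]; split <;> simp
  omega

-- B's comparison, abbreviated for the proofs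
def checkB (r0 r1 : List (Char × Nat)) : Bool :=
  if r0.length ≠ r1.length then false
  else (r0.zip r1).all (fun pq => okPair pq.1 pq.2)

theorem checkB_cons (p q : Char × Nat) (r0 r1 : List (Char × Nat)) :
    checkB (p :: r0) (q :: r1) = (okPair p q && checkB r0 r1) := by
  unfold checkB
  by_cases h : r0.length = r1.length
  · simp [h]
  · simp [h]

theorem loopA_eq_checkB (n : Nat) (l0 l1 : List Char) (hn : l0.length ≤ n) :
    loopA l0 l1 = checkB (rleB l0) (rleB l1) := by
  induction n generalizing l0 l1 with
  | zero =>
    have h0 : l0 = [] := by cases l0 <;> simp_all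
    subst h0
    cases l1 with
    | nil => simp [loopA, rleB, checkB]
    | cons y ys =>
      rw [rleB_cons, show rleB ([] : List Char) = [] from rfl]
      simp [loopA, checkB]
  | succ n ih =>
    cases l0 with
    | nil =>
      cases l1 with
      | nil => simp [loopA, rleB, checkB]
      | cons y ys =>
        rw [rleB_cons, show rleB ([] : List Char) = [] from rfl]
        simp [loopA, checkB]
    | cons x xs =>
      cases l1 with
      | nil =>
        rw [rleB_cons, show rleB ([] : List Char) = [] from rfl]
        simp [loopA, checkB]
      | cons y ys =>
        rw [rleB_cons, rleB_cons, checkB_cons]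
        by_cases hxy : x = y
        · subst hxy
          rw [loopA]
          simp only [ne_eq, not_true_eq_false, if_false]
          by_cases hc : (runA x xs).1 < (runA x ys).1 ∨ ((runA x ys).1 < (runA x xs).1 ∧ (runA x xs).1 < 3)
          · rw [if_pos hc]
            have : okPair (x, (runA x xs).1) (x, (runA x ys).1) = false := by
              simp [okPair]
              omega
            simp [this]
          · rw [if_neg hc]
            have hok : okPair (x, (runA x xs).1) (x, (runA x ys).1) = true := by
              simp [okPair]
              omega
            rw [hok, Bool.true_and]
            exact ih (runA x xs).2 (runA x ys).2
              (le_trans (runA_snd_length x xs) (Nat.le_of_succ_le_succ hn))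
        · rw [loopA]
          rw [if_pos hxy]
          have : okPair (x, (runA x xs).1) (y, (runA y ys).1) = false := by
            simp [okPair, hxy]
          simp [this]

-- ===== VERDICT (by name: the statement is the Claim_ definition above) =====
theorem isStretchy_spec : Claim_equal_isStretchy := by
  intro s0 s1 _
  unfold Spec_isStretchy isStretchy isStretchy_alt
  rw [loopA_eq_checkB s0.toList.length s0.toList s1.toList (le_refl _)]
  rfl
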